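-- pv_equiv track=rewrite | github.com/Straits-AI/sovreign-ai | src/sovreign/validate.py | _is_robotic
-- ===== SOURCE A (Python) =====
-- def _is_robotic(text: str) -> bool:
--     if len(text) < 10:
--         return True
--     robotic_markers = [
--         "as an ai", "i cannot", "here is an example", "sure, here",
--         "certainly!", "of course!", "happy to help",
--     ]
--     text_lower = text.lower()
--     return any(m in text_lower for m in robotic_markers)
-- ===== SOURCE B (Python) =====
-- def _is_robotic(text: str) -> bool:
--     if len(text) < 10:
--         return True
--     markers = (
--         "as an ai", "i cannot", "here is an example", "sure, here",
--         "certainly!", "of course!", "happy to help",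
--     )
--     tl = text.lower()
--     return any(tl.startswith(markers, i) for i in range(len(tl)))
-- ===== Notes on version B (the rewrite author's own statement) =====
-- stated objective: alternative
-- what changed: Replaces seven independent per-marker substring scans with one position-major left-to-right pass that at each position checks whether any marker starts there (str.startswith with a tuple), keeping the len<10 guard and lowercasing.
import Mathlib
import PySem

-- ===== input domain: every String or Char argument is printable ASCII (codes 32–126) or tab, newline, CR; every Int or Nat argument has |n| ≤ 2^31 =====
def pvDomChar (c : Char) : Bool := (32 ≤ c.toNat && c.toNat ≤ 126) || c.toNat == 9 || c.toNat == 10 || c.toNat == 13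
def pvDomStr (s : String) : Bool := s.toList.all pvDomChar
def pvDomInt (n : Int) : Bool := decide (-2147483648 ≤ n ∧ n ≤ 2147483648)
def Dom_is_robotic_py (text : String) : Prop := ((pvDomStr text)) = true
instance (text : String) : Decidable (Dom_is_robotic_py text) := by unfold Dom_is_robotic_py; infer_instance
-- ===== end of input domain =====

-- B replaces seven independent substring scans with one position-major pass that checks
-- every marker at each position (str.startswith with a tuple); same guard, same lowering. Objective: alternative.


-- ===== PORT A =====
-- the seven markers, as lists of chars (shared literal data, not logic)
def pvMarkers : List (List Char) :=
  ["as an ai".toList, "i cannot".toList, "here is an example".toList, "sure, here".toList,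
   "certainly!".toList, "of course!".toList, "happy to help".toList]

-- literal port of A: guard, lower once, then 'any(m in text_lower for m in markers)'
def is_robotic_py (text : String) : Bool :=
  if PySem.Str.len text < 10 then true
  else
    let text_lower := PySem.Chars.lower text.toList
    pvMarkers.any (fun m => PySem.Chars.isIn m text_lower)

-- ===== PORT B =====
-- Source B's position loop 'any(tl.startswith(markers, i) for i in range(len(tl)))' as the
-- obvious structural recursion over suffixes: position i ↦ suffix tl.drop i, and
-- tl.startswith(markers, i) is 'some marker is a prefix of that suffix'.
def pvScan (ms : List (List Char)) : List Char → Bool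
  | [] => false
  | c :: rest => ms.any (fun m => m.isPrefixOf (c :: rest)) || pvScan ms rest

def is_robotic_py_alt (text : String) : Bool :=
  if PySem.Str.len text < 10 then true
  else pvScan pvMarkers (PySem.Chars.lower text.toList)

-- ===== PRECONDITION & SPEC =====
def Spec_is_robotic_py (text : String) (out : Bool) : Prop := out = is_robotic_py_alt text
instance (text : String) (out : Bool) : Decidable (Spec_is_robotic_py text out) := by unfold Spec_is_robotic_py; infer_instance

-- ===== CLAIM (what is proved, stated in full; the proofs are below) =====
def Claim_equal_is_robotic_py : Prop := ∀ (text : String), Dom_is_robotic_py text → Spec_is_robotic_py text (is_robotic_py text)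

-- ===== LEMMAS AND PROOFS =====
-- the position-major scan finds exactly the markers that occur as infixes (markers nonempty)
theorem pvScan_eq_any_isIn (ms : List (List Char)) (h : ∀ m ∈ ms, m ≠ []) (cs : List Char) :
    pvScan ms cs = ms.any (fun m => PySem.Chars.isIn m cs) := by
  induction cs with
  | nil =>
    show (false : Bool) = _
    symm
    rw [List.any_eq_false]
    intro m hm hinf
    exact h m hm (List.eq_nil_of_infix_nil (PySem.Chars.isIn_iff_infix m [] |>.mp hinf))
  | cons c rest ih =>
    rw [pvScan, ih, Bool.eq_iff_iff, Bool.or_eq_true]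
    simp only [List.any_eq_true, PySem.Chars.isIn_iff_infix, List.isPrefixOf_iff_prefix,
      List.infix_cons_iff]
    aesop

-- ===== VERDICT (by name: the statement is the Claim_ definition above) =====
theorem is_robotic_py_spec : Claim_equal_is_robotic_py := by
  intro text _
  unfold Spec_is_robotic_py is_robotic_py is_robotic_py_alt
  split
  · rfl
  · exact (pvScan_eq_any_isIn pvMarkers (by decide) _).symm
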